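-- pv_equiv track=rewrite | github.com/disputestrike/RELEASE-CRUCIB-2026 | backend/orchestration/enterprise_proof.py | _classification_markdown
-- ===== SOURCE A (Python) =====
-- from typing import Any, Dict, Iterable, List, Mapping, Optional
--
-- def _classification_markdown(classification: Mapping[str, Any]) -> str:
--     groups = {label: [] for label in ("Implemented", "Mocked", "Stubbed", "Unverified", "Blocked")}
--     for feature in classification.get("features") or []:
--         groups.setdefault(str(feature.get("status")), []).append(feature)
--
--     sections = []
--     for label in ("Implemented", "Mocked", "Stubbed", "Unverified", "Blocked"):
--         items = groups.get(label) or []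
--         sections.append(f"## {label}")
--         if not items:
--             sections.append("- None")
--         else:
--             sections.extend(f"- {item['feature']}: {item['evidence']}" for item in items)
--     return "\n\n".join(sections)
-- ===== SOURCE B (Python) =====
-- _LABELS = ("Implemented", "Mocked", "Stubbed", "Unverified", "Blocked")
--
--
-- def _section(label, feats):
--     lines = [f"- {f['feature']}: {f['evidence']}" for f in feats if str(f.get("status")) == label]
--     return [f"## {label}"] + (lines if lines else ["- None"])
--
--
-- def _classification_markdown(classification):
--     feats = classification.get("features") or []
--     return "\n\n".join(s for label in _LABELS for s in _section(label, feats))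
-- ===== Notes on version B (the rewrite author's own statement) =====
-- stated objective: simpler
-- what changed: Drops the grouping dict entirely: for each of the five fixed labels B filters the feature list directly and emits that label's section, instead of building and then reading back a status-keyed dictionary.
import Mathlib
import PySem

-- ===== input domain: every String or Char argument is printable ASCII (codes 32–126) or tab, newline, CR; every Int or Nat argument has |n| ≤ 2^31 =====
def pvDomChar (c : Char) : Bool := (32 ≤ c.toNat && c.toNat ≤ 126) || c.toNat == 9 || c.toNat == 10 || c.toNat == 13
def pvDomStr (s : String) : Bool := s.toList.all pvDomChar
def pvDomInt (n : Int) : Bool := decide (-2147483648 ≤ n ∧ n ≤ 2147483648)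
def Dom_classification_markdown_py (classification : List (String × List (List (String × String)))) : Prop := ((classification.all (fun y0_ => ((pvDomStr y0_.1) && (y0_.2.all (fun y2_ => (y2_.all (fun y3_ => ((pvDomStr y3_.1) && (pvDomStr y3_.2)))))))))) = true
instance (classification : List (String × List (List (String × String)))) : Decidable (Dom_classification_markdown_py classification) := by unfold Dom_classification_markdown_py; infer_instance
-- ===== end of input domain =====

-- B drops A's grouping dict: it filters the feature list once per fixed label (same O(n·5) work, plainer code).
-- Pre_ excludes only inputs where A raises KeyError (a feature whose status is one of the five labels but lacks
-- the 'feature' or 'evidence' key); B raises there too.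

-- ===== PORT A =====
-- the five fixed labels (the tuple literal in A)
def pyLabels : List String := ["Implemented", "Mocked", "Stubbed", "Unverified", "Blocked"]

-- str(feature.get("status")): the value if present, else str(None) = "None"
def pyStatusStr (f : List (String × String)) : String :=
  match (PySem.Dict.mk f).get? "status" with
  | some s => s
  | none => "None"

-- f"- {item['feature']}: {item['evidence']}"; the getD defaults are never hit under Pre_ (Python raises KeyError there)
def pyFeatureLine (f : List (String × String)) : String :=
  "- " ++ (PySem.Dict.mk f).getD "feature" "" ++ ": " ++ (PySem.Dict.mk f).getD "evidence" ""

def classification_markdown_py (classification : List (String × List (List (String × String)))) : String :=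
  let feats := ((PySem.Dict.mk classification).get? "features").getD []
  let groups0 : PySem.Dict String (List (List (String × String))) :=
    pyLabels.foldl (fun d label => d.insert label []) PySem.Dict.empty
  let groups := feats.foldl (fun d f => d.modify (pyStatusStr f) [] (· ++ [f])) groups0
  let sections := pyLabels.foldl (fun acc label =>
    let items := groups.getD label []
    let acc := acc ++ ["## " ++ label]
    if items.isEmpty then acc ++ ["- None"] else acc ++ items.map pyFeatureLine) []
  PySem.Str.join "\n\n" sections

-- ===== PORT B =====
def bSection (label : String) (feats : List (List (String × String))) : List String :=
  let lines := (feats.filter (fun f => pyStatusStr f == label)).map pyFeatureLine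
  ("## " ++ label) :: (if lines.isEmpty then ["- None"] else lines)

def classification_markdown_py_alt (classification : List (String × List (List (String × String)))) : String :=
  let feats := ((PySem.Dict.mk classification).get? "features").getD []
  PySem.Str.join "\n\n" (pyLabels.flatMap (fun label => bSection label feats))

-- ===== PRECONDITION & SPEC =====
-- Pre_ excludes exactly the inputs on which Python A raises KeyError: a feature whose status string is one of
-- the five labels but which lacks the 'feature' or 'evidence' key.
def Pre_classification_markdown_py (classification : List (String × List (List (String × String)))) : Prop :=
  ∀ f ∈ ((PySem.Dict.mk classification).get? "features").getD [],
    pyStatusStr f ∈ pyLabels →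
      (PySem.Dict.mk f).contains "feature" = true ∧ (PySem.Dict.mk f).contains "evidence" = true
instance (classification : List (String × List (List (String × String)))) : Decidable (Pre_classification_markdown_py classification) := by unfold Pre_classification_markdown_py; infer_instance

def pvWitness_classification_markdown_py : (List (String × List (List (String × String)))) :=
  [("features", [[("status", "Implemented"), ("feature", "login"), ("evidence", "tests pass")],
                 [("status", "odd")]])]

def Spec_classification_markdown_py (classification : List (String × List (List (String × String)))) (out : String) : Prop := out = classification_markdown_py_alt classification
instance (classification : List (String × List (List (String × String)))) (out : String) : Decidable (Spec_classification_markdown_py classification out) := by unfold Spec_classification_markdown_py; infer_instance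

-- ===== CLAIM (what is proved, stated in full; the proofs are below) =====
def Claim_equal_classification_markdown_py : Prop := ∀ (classification : List (String × List (List (String × String)))), Dom_classification_markdown_py classification → Pre_classification_markdown_py classification → Spec_classification_markdown_py classification (classification_markdown_py classification)

-- ===== LEMMAS AND PROOFS =====

-- A's grouping loop read back at key c is exactly the filter of the features by status c
theorem getD_group (l : List (List (String × String))) (d : PySem.Dict String (List (List (String × String)))) (c : String) :
    (l.foldl (fun d f => d.modify (pyStatusStr f) [] (· ++ [f])) d).getD c []
      = d.getD c [] ++ l.filter (fun f => pyStatusStr f == c) := by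
  induction l generalizing d with
  | nil => simp
  | cons f t ih =>
    simp only [List.foldl_cons, List.filter_cons, ih]
    by_cases h : pyStatusStr f = c
    · subst h
      simp [PySem.Dict.getD_modify_self]
    · simp [PySem.Dict.getD_modify, h, Ne.symm h]

-- every lookup in the all-[] seed dict is []
theorem getD_init (ls : List String) (d : PySem.Dict String (List (List (String × String))))
    (h : ∀ c, d.getD c [] = []) (c : String) :
    (ls.foldl (fun d label => d.insert label ([] : List (List (String × String)))) d).getD c [] = [] := by
  induction ls generalizing d with
  | nil => exact h c
  | cons a t ih =>
    refine ih _ (fun c => ?_)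
    rw [PySem.Dict.getD_insert]
    split
    · rfl
    · exact h c

-- A's section loop over any label list, reading groups through any lookup g that returns the status filter,
-- is B's flatMap of sections
theorem sections_eq (ls : List String) (feats : List (List (String × String)))
    (g : String → List (List (String × String)))
    (hg : ∀ l, g l = feats.filter (fun f => pyStatusStr f == l)) (acc : List String) :
    ls.foldl (fun acc label =>
        let items := g label
        let acc := acc ++ ["## " ++ label]
        if items.isEmpty then acc ++ ["- None"] else acc ++ items.map pyFeatureLine) acc
      = acc ++ ls.flatMap (fun label => bSection label feats) := by
  induction ls generalizing acc with
  | nil => simp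
  | cons a t ih =>
    simp only [List.foldl_cons, ih, List.flatMap_cons]
    rcases Bool.eq_false_or_eq_true ((feats.filter (fun f => pyStatusStr f == a)).isEmpty) with h | h <;>
      simp [bSection, hg, List.isEmpty_map, h]

-- ===== VERDICT (by name: the statement is the Claim_ definition above) =====
theorem classification_markdown_py_spec : Claim_equal_classification_markdown_py := by
  intro classification _ _
  unfold Spec_classification_markdown_py
  simp only [classification_markdown_py, classification_markdown_py_alt]
  rw [sections_eq _ (((PySem.Dict.mk classification).get? "features").getD []) _
    (fun l => by rw [getD_group, getD_init pyLabels PySem.Dict.empty (fun c => by simp)]; simp)]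
  simp
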